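-- pv_equiv track=rewrite | github.com/Anuraj-dev/MonkeyType-for-terminal | typing_game/ui.py | fallback_render_snapshot
-- ===== SOURCE A (Python) =====
-- from typing import Any, List, Sequence, Tuple, Optional
--
-- def highlight_word(target: str, typed: str, caret: bool = True) -> List[Tuple[str, str]]:
-- 	"""Return list of (segment, style) for a single word.
--
-- 	style values: 'correct', 'wrong', 'caret' (for next char), 'pending'.
-- 	Caret is placed at next character to type if caret flag True and word not complete.
-- 	Better error visualization for mismatches and omissions.
-- 	"""
-- 	out: List[Tuple[str, str]] = []
--
-- 	# Compare each position of typed vs target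
-- 	for i, ch in enumerate(typed):
-- 		if i < len(target) and ch == target[i]:
-- 			out.append((ch, "correct"))
-- 		else:
-- 			# Character is wrong (either mismatch or extra)
-- 			out.append((ch, "wrong"))
--
-- 	# Handle remaining characters in target
-- 	if len(typed) < len(target):
-- 		next_char = target[len(typed)]
-- 		if caret:
-- 			out.append((next_char, "caret"))
-- 			remaining = target[len(typed)+1:]
-- 			if remaining:
-- 				out.append((remaining, "pending"))
-- 		else:
-- 			out.append((target[len(typed):], "pending"))
--
-- 	return out
--
-- def fallback_render_snapshot(words: Sequence[str], current_index: int, typed_current: str) -> str: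
-- 	"""Return a simple multi-line fallback rendering string (plain mode)."""
-- 	preview = []
-- 	for i, w in enumerate(words[current_index: current_index + 10]):
-- 		if i == 0:
-- 			segments = highlight_word(w, typed_current)
-- 			preview.append("".join(seg for seg, _ in segments))
-- 		else:
-- 			preview.append(w)
-- 	return " ".join(preview)
-- ===== SOURCE B (Python) =====
-- def fallback_render_snapshot(words, current_index, typed_current):
--     window = list(words[current_index:current_index + 10])
--     if not window:
--         return ""
--     head = typed_current + window[0][len(typed_current):]
--     return " ".join([head] + window[1:])
-- ===== Notes on version B (the rewrite author's own statement) =====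
-- stated objective: simpler
-- what changed: B renders the current word directly as typed_current + word[len(typed_current):] (one slice concatenation) and joins it with the rest of the 10-word window, removing the per-character highlight loop and the per-character segment/style tuple-list machinery entirely.
import Mathlib
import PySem

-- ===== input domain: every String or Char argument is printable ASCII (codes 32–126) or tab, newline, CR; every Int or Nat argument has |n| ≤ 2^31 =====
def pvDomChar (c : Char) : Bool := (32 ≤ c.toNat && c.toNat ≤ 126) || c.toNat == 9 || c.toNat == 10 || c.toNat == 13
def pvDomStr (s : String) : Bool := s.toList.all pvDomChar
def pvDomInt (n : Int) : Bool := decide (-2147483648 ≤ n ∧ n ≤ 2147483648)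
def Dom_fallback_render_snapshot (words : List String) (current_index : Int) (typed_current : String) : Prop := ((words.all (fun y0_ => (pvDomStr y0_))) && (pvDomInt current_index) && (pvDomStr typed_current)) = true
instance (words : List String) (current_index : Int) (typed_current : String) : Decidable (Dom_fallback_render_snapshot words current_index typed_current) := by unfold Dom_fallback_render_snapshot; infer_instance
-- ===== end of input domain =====

-- B replaces A's per-character highlight loop by one slice concatenation
-- (typed ++ untyped suffix of the current word); objective: simpler. Return value only.

-- ===== PORT A =====
-- Python helper highlight_word; word segments are carried as List Char (Python str),
-- styles as String. target[len(typed)] is reached only under the guard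
-- len(typed) < len(target), so getD there is exact (the default is never used).
def highlight_word (target typed : List Char) (caret : Bool) : List (List Char × String) :=
  let out : List (List Char × String) :=
    (PySem.List.enumerate typed).foldl (fun out ic =>
      if ic.1 < (target.length : Int) ∧ PySem.List.pyGet? target ic.1 = some ic.2 then
        out ++ [([ic.2], "correct")]
      else
        out ++ [([ic.2], "wrong")]) []
  if typed.length < target.length then
    let next_char := target.getD typed.length ' '
    if caret then
      let out := out ++ [([next_char], "caret")]
      let remaining := target.drop (typed.length + 1)
      if remaining ≠ [] then out ++ [(remaining, "pending")] else out
    else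
      out ++ [(target.drop typed.length, "pending")]
  else out

-- "".join(seg for seg, _ in segments) is ported as the left fold concatenating the
-- first components; " ".join via PySem.Str.join.
def fallback_render_snapshot (words : List String) (current_index : Int) (typed_current : String) : String :=
  let preview : List String :=
    (PySem.List.enumerate (PySem.List.slice words (some current_index) (some (current_index + 10)))).foldl
      (fun preview iw =>
        if iw.1 = 0 then
          preview ++ [String.ofList ((highlight_word iw.2.toList typed_current.toList true).foldl
            (fun acc seg => acc ++ seg.1) [])]
        else preview ++ [iw.2]) []
  PySem.Str.join " " preview

-- ===== PORT B =====
def fallback_render_snapshot_alt (words : List String) (current_index : Int) (typed_current : String) : String :=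
  match PySem.List.slice words (some current_index) (some (current_index + 10)) with
  | [] => ""
  | w :: rest =>
      let head := String.ofList (typed_current.toList ++
        PySem.Chars.slice w.toList (some (PySem.Str.len typed_current)) none)
      PySem.Str.join " " (head :: rest)

-- ===== PRECONDITION & SPEC =====
def Spec_fallback_render_snapshot (words : List String) (current_index : Int) (typed_current : String) (out : String) : Prop := out = fallback_render_snapshot_alt words current_index typed_current
instance (words : List String) (current_index : Int) (typed_current : String) (out : String) : Decidable (Spec_fallback_render_snapshot words current_index typed_current out) := by unfold Spec_fallback_render_snapshot; infer_instance

-- ===== CLAIM (what is proved, stated in full; the proofs are below) =====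
def Claim_equal_fallback_render_snapshot : Prop := ∀ (words : List String) (current_index : Int) (typed_current : String), Dom_fallback_render_snapshot words current_index typed_current → Spec_fallback_render_snapshot words current_index typed_current (fallback_render_snapshot words current_index typed_current)

-- ===== LEMMAS AND PROOFS =====

-- Concatenating the first components of a segment list by foldl is flattening.
theorem flat_segs (l : List (List Char × String)) (a : List Char) :
    l.foldl (fun acc seg => acc ++ seg.1) a = a ++ (l.map Prod.fst).flatten := by
  induction l generalizing a with
  | nil => simp
  | cons x xs ih => simp [List.foldl_cons, ih]

-- The character-comparison loop of highlight_word yields one singleton segment per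
-- typed character, whatever the styles are.
theorem hl_loop_fst (target : List Char) (l : List (Int × Char)) (acc : List (List Char × String)) :
    (l.foldl (fun out ic =>
      if ic.1 < (target.length : Int) ∧ PySem.List.pyGet? target ic.1 = some ic.2 then
        out ++ [([ic.2], "correct")]
      else
        out ++ [([ic.2], "wrong")]) acc).map Prod.fst
    = acc.map Prod.fst ++ l.map (fun ic => [ic.2]) := by
  induction l generalizing acc with
  | nil => simp
  | cons x xs ih => by_cases h : x.1 < (target.length : Int) ∧ PySem.List.pyGet? target x.1 = some x.2 <;>
      simp [List.foldl_cons, h, ih]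

-- The loop's segments flatten back to exactly the typed characters.
theorem enum_snd (l : List Char) (k : Int) : (PySem.List.enumerate l k).map Prod.snd = l := by
  simp [pysem]

theorem flat_singleton (l : List (Int × Char)) :
    (l.map (fun ic => [ic.2])).flatten = l.map Prod.snd := by
  induction l with
  | nil => rfl
  | cons x xs ih => simp [ih]

theorem loop_flat (target typed : List Char) :
    ((typed |> PySem.List.enumerate |>.foldl (fun out ic =>
      if ic.1 < (target.length : Int) ∧ PySem.List.pyGet? target ic.1 = some ic.2 then
        out ++ [([ic.2], "correct")]
      else
        out ++ [([ic.2], "wrong")]) []).map Prod.fst).flatten = typed := by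
  rw [hl_loop_fst]
  simp only [List.map_nil, List.nil_append, flat_singleton]
  exact enum_snd typed 0

-- Joined, highlight_word's segments are exactly typed ++ the untyped suffix of target.
theorem highlight_word_flat (target typed : List Char) :
    ((highlight_word target typed true).map Prod.fst).flatten = typed ++ target.drop typed.length := by
  unfold highlight_word
  by_cases h : typed.length < target.length
  · by_cases hr : target.drop (typed.length + 1) = []
    · simp [h, hr, List.map_append, List.flatten_append, loop_flat]
      rw [List.drop_eq_getElem_cons h, hr]
    · simp [h, hr, List.map_append, List.flatten_append, loop_flat]
  · have hd : target.drop typed.length = [] := List.drop_eq_nil_of_le (by omega)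
    simp [h, hd, loop_flat]

-- The preview loop of A appends every word after the first verbatim.
theorem preview_tail (typed : String) (rest : List String) (k : Int) (hk : 1 ≤ k) (acc : List String) :
    (PySem.List.enumerate rest k).foldl
      (fun preview iw =>
        if iw.1 = 0 then
          preview ++ [String.ofList ((highlight_word iw.2.toList typed.toList true).foldl
            (fun acc seg => acc ++ seg.1) [])]
        else preview ++ [iw.2]) acc
    = acc ++ rest := by
  induction rest generalizing k acc with
  | nil => simp [PySem.List.enumerate]
  | cons x xs ih =>
      rw [show PySem.List.enumerate (x :: xs) k = (k, x) :: PySem.List.enumerate xs (k + 1) from rfl]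
      have hk0 : ¬ (k = 0) := by omega
      simp only [List.foldl_cons, hk0, if_false]
      rw [ih (k + 1) (by omega)]
      simp

-- ===== VERDICT (by name: the statement is the Claim_ definition above) =====
theorem fallback_render_snapshot_spec : Claim_equal_fallback_render_snapshot := by
  intro words ci typed _
  unfold Spec_fallback_render_snapshot fallback_render_snapshot fallback_render_snapshot_alt
  cases hwin : PySem.List.slice words (some ci) (some (ci + 10)) with
  | nil => simp [PySem.List.enumerate]; decide
  | cons w rest =>
      rw [show PySem.List.enumerate (w :: rest) 0 = ((0 : Int), w) :: PySem.List.enumerate rest 1 from rfl]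
      simp only [List.foldl_cons, if_true]
      rw [preview_tail typed rest 1 le_rfl]
      rw [flat_segs, highlight_word_flat, PySem.Str.len_eq, PySem.Chars.slice_eq_listSlice,
        PySem.List.slice_from _ (Int.natCast_nonneg _)]
      simp
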